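-- pv_equiv track=rewrite | github.com/claycampbell/InvestBrain | services/one_pager_service.py | _assess_risk_coverage
-- ===== SOURCE A (Python) =====
-- from typing import Dict, List, Any, Optional
--
-- def _assess_risk_coverage(detailed_signals: List[Dict]) -> str:
--     """Assess risk coverage across investment dimensions"""
--     risk_areas = set()
--
--     for signal in detailed_signals:
--         signal_name = signal.get('signal_name', '').lower()
--         if 'revenue' in signal_name:
--             risk_areas.add("Revenue Risk")
--         if 'margin' in signal_name:
--             risk_areas.add("Profitability Risk")
--         if 'market' in signal_name:
--             risk_areas.add("Market Risk")
--         if 'competitive' in signal_name: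
--             risk_areas.add("Competitive Risk")
--
--     risk_count = len(risk_areas)
--
--     if risk_count >= 3:
--         return f"Comprehensive risk coverage across {risk_count} major risk categories providing early warning indicators for potential investment threats."
--     elif risk_count >= 2:
--         return f"Good risk coverage across {risk_count} risk categories with adequate risk monitoring."
--     else:
--         return "Basic risk coverage requiring expansion for comprehensive risk management."
-- ===== SOURCE B (Python) =====
-- from typing import Dict, List, Any, Optional
--
-- def _assess_risk_coverage(detailed_signals: List[Dict]) -> str:
--     """Assess risk coverage across investment dimensions"""
--     text = ' '.join(s.get('signal_name', '').lower() for s in detailed_signals)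
--     mapping = {
--         'revenue': 'Revenue Risk',
--         'margin': 'Profitability Risk',
--         'market': 'Market Risk',
--         'competitive': 'Competitive Risk',
--     }
--     risk_count = sum(1 for kw in mapping if kw in text)
--
--     if risk_count >= 3:
--         return f"Comprehensive risk coverage across {risk_count} major risk categories providing early warning indicators for potential investment threats."
--     elif risk_count >= 2:
--         return f"Good risk coverage across {risk_count} risk categories with adequate risk monitoring."
--     else:
--         return "Basic risk coverage requiring expansion for comprehensive risk management."
-- ===== Notes on version B (the rewrite author's own statement) =====
-- stated objective: alternative
-- what changed: Instead of a per-signal loop testing each keyword and accumulating a set of labels, B joins all lowercased signal names into one space-separated text once and counts keywords of a keyword->label table found in that text (the single-space separator cannot create cross-name matches since no keyword contains a space).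
import Mathlib
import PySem

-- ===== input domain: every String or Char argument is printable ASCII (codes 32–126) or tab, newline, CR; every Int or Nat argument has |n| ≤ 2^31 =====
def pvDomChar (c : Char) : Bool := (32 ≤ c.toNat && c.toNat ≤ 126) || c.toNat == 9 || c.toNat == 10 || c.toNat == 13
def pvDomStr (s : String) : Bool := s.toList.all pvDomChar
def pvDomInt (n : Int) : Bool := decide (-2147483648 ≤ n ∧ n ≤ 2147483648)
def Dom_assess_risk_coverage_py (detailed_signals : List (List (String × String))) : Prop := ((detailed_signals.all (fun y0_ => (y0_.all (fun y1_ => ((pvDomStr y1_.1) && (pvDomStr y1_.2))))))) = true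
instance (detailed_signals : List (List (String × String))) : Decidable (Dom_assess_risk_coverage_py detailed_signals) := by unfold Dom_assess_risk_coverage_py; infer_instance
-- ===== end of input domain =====

-- B replaces A's per-signal loop over keyword tests accumulating a set of labels by joining all
-- lowercased signal names into one space-separated text and counting the keywords of a
-- keyword->label table found in that text (alternative decomposition, same cost).

-- ===== PORT A =====
-- A-side helpers: one conditional set-insertion, and the body of A's for-loop
def pvAddIf (cond : Bool) (st : PySem.Set String) (label : String) : PySem.Set String :=
  if cond then PySem.Set.add st label else st

def pvStepA (risk_areas : PySem.Set String) (signal : List (String × String)) : PySem.Set String :=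
  let signal_name := PySem.Str.lower (PySem.Dict.getD (PySem.Dict.mk signal) "signal_name" "")
  let risk_areas := pvAddIf (PySem.Str.isIn "revenue" signal_name) risk_areas "Revenue Risk"
  let risk_areas := pvAddIf (PySem.Str.isIn "margin" signal_name) risk_areas "Profitability Risk"
  let risk_areas := pvAddIf (PySem.Str.isIn "market" signal_name) risk_areas "Market Risk"
  let risk_areas := pvAddIf (PySem.Str.isIn "competitive" signal_name) risk_areas "Competitive Risk"
  risk_areas

def assess_risk_coverage_py (detailed_signals : List (List (String × String))) : String :=
  let risk_areas : PySem.Set String := detailed_signals.foldl pvStepA PySem.Set.empty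
  let risk_count : Int := PySem.Set.len risk_areas
  if 3 ≤ risk_count then
    "Comprehensive risk coverage across " ++ PySem.Int.toStr risk_count ++ " major risk categories providing early warning indicators for potential investment threats."
  else if 2 ≤ risk_count then
    "Good risk coverage across " ++ PySem.Int.toStr risk_count ++ " risk categories with adequate risk monitoring."
  else
    "Basic risk coverage requiring expansion for comprehensive risk management."

-- ===== PORT B =====
def assess_risk_coverage_py_alt (detailed_signals : List (List (String × String))) : String :=
  let text := PySem.Str.join " " (detailed_signals.map (fun s => PySem.Str.lower (PySem.Dict.getD (PySem.Dict.mk s) "signal_name" "")))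
  let mapping : PySem.Dict String String :=
    PySem.Dict.mk [("revenue", "Revenue Risk"), ("margin", "Profitability Risk"),
     ("market", "Market Risk"), ("competitive", "Competitive Risk")]
  let risk_count : Int := (PySem.Dict.keys mapping).foldl (fun acc kw => if PySem.Str.isIn kw text then acc + 1 else acc) 0
  if 3 ≤ risk_count then
    "Comprehensive risk coverage across " ++ PySem.Int.toStr risk_count ++ " major risk categories providing early warning indicators for potential investment threats."
  else if 2 ≤ risk_count then
    "Good risk coverage across " ++ PySem.Int.toStr risk_count ++ " risk categories with adequate risk monitoring."
  else
    "Basic risk coverage requiring expansion for comprehensive risk management."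

-- ===== PRECONDITION & SPEC =====
def Spec_assess_risk_coverage_py (detailed_signals : List (List (String × String))) (out : String) : Prop := out = assess_risk_coverage_py_alt detailed_signals
instance (detailed_signals : List (List (String × String))) (out : String) : Decidable (Spec_assess_risk_coverage_py detailed_signals out) := by unfold Spec_assess_risk_coverage_py; infer_instance

-- ===== CLAIM (what is proved, stated in full; the proofs are below) =====
def Claim_equal_assess_risk_coverage_py : Prop := ∀ (detailed_signals : List (List (String × String))), Dom_assess_risk_coverage_py detailed_signals → Spec_assess_risk_coverage_py detailed_signals (assess_risk_coverage_py detailed_signals)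

-- ===== LEMMAS AND PROOFS =====

-- proof-side abbreviations
def pvName (signal : List (String × String)) : String :=
  PySem.Str.lower (PySem.Dict.getD (PySem.Dict.mk signal) "signal_name" "")

def pvHit (detailed_signals : List (List (String × String))) (kw : String) : Bool :=
  detailed_signals.any (fun s => PySem.Str.isIn kw (pvName s))

def pvPairs : List (String × String) :=
  [("revenue", "Revenue Risk"), ("margin", "Profitability Risk"),
   ("market", "Market Risk"), ("competitive", "Competitive Risk")]

-- a keyword without spaces that is a prefix somewhere inside a ++ ' ' :: b sits inside a or inside b
lemma pv_prefix_split (kw a b : List Char) (hsp : ' ' ∉ kw) (j : Nat)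
    (h : kw <+: (a ++ ' ' :: b).drop j) :
    PySem.Chars.isIn kw a = true ∨ PySem.Chars.isIn kw b = true := by
  by_cases hj : j ≤ a.length
  · rw [List.drop_append_of_le_length hj] at h
    by_cases hlen : j + kw.length ≤ a.length
    · left
      rw [← PySem.Chars.exists_prefix_drop_iff_isIn]
      refine ⟨j, ?_⟩
      have h2 : kw = List.take kw.length (List.drop j a) := by
        conv_lhs => rw [List.prefix_iff_eq_take.mp h]
        rw [List.take_append_of_le_length (by simp; omega)]
      rw [h2]
      exact List.take_prefix _ _
    · exfalso
      apply hsp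
      rw [List.prefix_iff_eq_take, List.take_append] at h
      simp only [List.length_drop] at h
      have hpos : 0 < kw.length - (a.length - j) := by omega
      rcases Nat.exists_eq_add_of_lt hpos with ⟨m, hm⟩
      rw [h]
      apply List.mem_append_right
      rw [hm]
      simp
  · right
    rw [← PySem.Chars.exists_prefix_drop_iff_isIn]
    refine ⟨j - a.length - 1, ?_⟩
    rw [List.drop_append] at h
    have h1 : List.drop j a = ([] : List Char) := by
      apply List.drop_eq_nil_of_le; omega
    rw [h1, List.nil_append] at h
    have h2 : j - a.length = (j - a.length - 1) + 1 := by omega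
    rw [h2, List.drop_succ_cons] at h
    exact h

lemma pv_isIn_append_cons_iff (kw a b : List Char) (hsp : ' ' ∉ kw) :
    PySem.Chars.isIn kw (a ++ ' ' :: b) = true ↔
      (PySem.Chars.isIn kw a = true ∨ PySem.Chars.isIn kw b = true) := by
  constructor
  · intro h
    rw [← PySem.Chars.exists_prefix_drop_iff_isIn] at h
    rcases h with ⟨j, hj⟩
    exact pv_prefix_split kw a b hsp j hj
  · intro h
    rw [PySem.Chars.isIn_iff_infix]
    rcases h with h | h
    · rw [PySem.Chars.isIn_iff_infix] at h
      exact h.trans (List.prefix_append a (' ' :: b)).isInfix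
    · rw [PySem.Chars.isIn_iff_infix] at h
      exact h.trans ((List.suffix_cons ' ' b).trans (List.suffix_append a (' ' :: b))).isInfix

-- keyword containment in the joined text = containment in one of the parts
lemma pv_isIn_join (kw : List Char) (hne : kw ≠ []) (hsp : ' ' ∉ kw) :
    ∀ parts : List (List Char),
      PySem.Chars.isIn kw (PySem.Chars.join [' '] parts) = parts.any (fun p => PySem.Chars.isIn kw p) := by
  intro parts
  induction parts with
  | nil =>
      simp [PySem.Chars.join_nil]
      rw [PySem.Chars.isIn_eq_false_iff]
      intro h
      exact hne (by simpa using h)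
  | cons p rest ih =>
      cases rest with
      | nil =>
          simp [PySem.Chars.join_singleton]
      | cons q rest' =>
          rw [PySem.Chars.join_cons_cons]
          have : p ++ [' '] ++ PySem.Chars.join [' '] (q :: rest')
              = p ++ ' ' :: PySem.Chars.join [' '] (q :: rest') := by simp
          rw [this]
          rw [Bool.eq_iff_iff, pv_isIn_append_cons_iff kw _ _ hsp]
          simp [← ih]

-- Str-level corollary for one of our four keywords
lemma pv_isIn_text (kw : String) (hne : kw.toList ≠ []) (hsp : ' ' ∉ kw.toList)
    (ds : List (List (String × String))) :
    PySem.Str.isIn kw (PySem.Str.join " " (ds.map (fun s => PySem.Str.lower (PySem.Dict.getD (PySem.Dict.mk s) "signal_name" ""))))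
      = pvHit ds kw := by
  rw [PySem.Str.isIn_eq, PySem.Str.toList_join]
  have hsep : (" " : String).toList = [' '] := rfl
  rw [hsep, List.map_map, pv_isIn_join kw.toList hne hsp]
  simp only [pvHit, pvName, List.any_map]
  rfl

lemma pv_mem_addIf {c : Bool} {st : PySem.Set String} {l x : String} :
    x ∈ pvAddIf c st l ↔ x ∈ st ∨ (c = true ∧ x = l) := by
  unfold pvAddIf
  split <;> simp_all [PySem.Set.mem_add]

lemma pv_nodup_addIf {c : Bool} {st : PySem.Set String} {l : String} (h : st.Nodup) :
    (pvAddIf c st l).Nodup := by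
  unfold pvAddIf
  split
  · exact PySem.Set.nodup_add _ _ h
  · exact h

-- membership in A's accumulated set
lemma pv_mem_foldl (ds : List (List (String × String))) :
    ∀ (st : PySem.Set String) (x : String),
      (x ∈ ds.foldl pvStepA st ↔ x ∈ st ∨ ∃ p ∈ pvPairs, p.2 = x ∧ pvHit ds p.1 = true) := by
  induction ds with
  | nil => intro st x; simp [pvHit]
  | cons s ds ih =>
      intro st x
      rw [List.foldl_cons, ih]
      have hstep : ∀ y, y ∈ pvStepA st s ↔ y ∈ st ∨ ∃ p ∈ pvPairs, p.2 = y ∧ PySem.Str.isIn p.1 (pvName s) = true := by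
        intro y
        simp only [pvStepA, pvPairs, pvName, pv_mem_addIf]
        simp only [List.mem_cons, List.not_mem_nil, or_false]
        constructor
        · rintro ((((h | ⟨h, rfl⟩) | ⟨h, rfl⟩) | ⟨h, rfl⟩) | ⟨h, rfl⟩)
          · exact Or.inl h
          · exact Or.inr ⟨_, Or.inl rfl, rfl, h⟩
          · exact Or.inr ⟨_, Or.inr (Or.inl rfl), rfl, h⟩
          · exact Or.inr ⟨_, Or.inr (Or.inr (Or.inl rfl)), rfl, h⟩
          · exact Or.inr ⟨_, Or.inr (Or.inr (Or.inr rfl)), rfl, h⟩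
        · rintro (h | ⟨p, (rfl | rfl | rfl | rfl), rfl, hk⟩)
          · exact Or.inl (Or.inl (Or.inl (Or.inl h)))
          · exact Or.inl (Or.inl (Or.inl (Or.inr ⟨hk, rfl⟩)))
          · exact Or.inl (Or.inl (Or.inr ⟨hk, rfl⟩))
          · exact Or.inl (Or.inr ⟨hk, rfl⟩)
          · exact Or.inr ⟨hk, rfl⟩
      rw [hstep x]
      have hh : ∀ kw, pvHit (s :: ds) kw = (PySem.Str.isIn kw (pvName s) || pvHit ds kw) := by
        intro kw; simp [pvHit]
      simp only [hh, Bool.or_eq_true]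
      constructor
      · rintro ((h | ⟨p, hp, hx, hk⟩) | ⟨p, hp, hx, hk⟩)
        · exact Or.inl h
        · exact Or.inr ⟨p, hp, hx, Or.inl hk⟩
        · exact Or.inr ⟨p, hp, hx, Or.inr hk⟩
      · rintro (h | ⟨p, hp, hx, (hk | hk)⟩)
        · exact Or.inl (Or.inl h)
        · exact Or.inl (Or.inr ⟨p, hp, hx, hk⟩)
        · exact Or.inr ⟨p, hp, hx, hk⟩

lemma pv_nodup_foldl (ds : List (List (String × String))) :
    ∀ st : PySem.Set String, st.Nodup → (ds.foldl pvStepA st).Nodup := by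
  induction ds with
  | nil => intro st h; simpa using h
  | cons s ds ih =>
      intro st h
      rw [List.foldl_cons]
      apply ih
      exact pv_nodup_addIf (pv_nodup_addIf (pv_nodup_addIf (pv_nodup_addIf h)))

-- the size of A's set is the number of triggered keyword/label pairs
lemma pv_lenA (ds : List (List (String × String))) :
    (ds.foldl pvStepA PySem.Set.empty).length
      = (pvPairs.filter (fun p => pvHit ds p.1)).length := by
  have hn1 : (ds.foldl pvStepA PySem.Set.empty).Nodup :=
    pv_nodup_foldl ds _ (by simp [PySem.Set.empty])
  have hn2 : ((pvPairs.filter (fun p => pvHit ds p.1)).map Prod.snd).Nodup := by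
    have hsub : List.Sublist ((pvPairs.filter (fun p => pvHit ds p.1)).map Prod.snd) (pvPairs.map Prod.snd) :=
      List.filter_sublist.map Prod.snd
    exact (by decide : (pvPairs.map Prod.snd).Nodup).sublist hsub
  have hperm : (ds.foldl pvStepA PySem.Set.empty).Perm
      ((pvPairs.filter (fun p => pvHit ds p.1)).map Prod.snd) := by
    rw [List.perm_ext_iff_of_nodup hn1 hn2]
    intro x
    rw [pv_mem_foldl ds PySem.Set.empty x]
    simp only [PySem.Set.empty, List.not_mem_nil, false_or, List.mem_map, List.mem_filter]
    constructor
    · rintro ⟨p, hp, hx, hk⟩; exact ⟨p, ⟨hp, hk⟩, hx⟩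
    · rintro ⟨p, ⟨hp, hk⟩, hx⟩; exact ⟨p, hp, hx, hk⟩
  calc (ds.foldl pvStepA PySem.Set.empty).length
      = ((pvPairs.filter (fun p => pvHit ds p.1)).map Prod.snd).length := hperm.length_eq
    _ = (pvPairs.filter (fun p => pvHit ds p.1)).length := by rw [List.length_map]

-- both risk counts coincide
lemma pv_count_eq (ds : List (List (String × String))) :
    (PySem.Set.len (ds.foldl pvStepA PySem.Set.empty) : Int)
      = (PySem.Dict.keys
          (PySem.Dict.mk [("revenue", "Revenue Risk"), ("margin", "Profitability Risk"),
            ("market", "Market Risk"), ("competitive", "Competitive Risk")])).foldl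
          (fun acc kw => if PySem.Str.isIn kw (PySem.Str.join " " (ds.map (fun s => PySem.Str.lower (PySem.Dict.getD (PySem.Dict.mk s) "signal_name" "")))) then acc + 1 else acc) 0 := by
  have hkeys : (PySem.Dict.keys
      (PySem.Dict.mk [("revenue", "Revenue Risk"), ("margin", "Profitability Risk"),
        ("market", "Market Risk"), ("competitive", "Competitive Risk")]))
      = ["revenue", "margin", "market", "competitive"] := by decide
  rw [hkeys, PySem.List.foldl_count_if]
  have h1 := pv_isIn_text "revenue" (by decide) (by decide) ds
  have h2 := pv_isIn_text "margin" (by decide) (by decide) ds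
  have h3 := pv_isIn_text "market" (by decide) (by decide) ds
  have h4 := pv_isIn_text "competitive" (by decide) (by decide) ds
  have hlen : PySem.Set.len (ds.foldl pvStepA PySem.Set.empty)
      = ((ds.foldl pvStepA PySem.Set.empty).length : Int) := by
    simp [PySem.Set.len]
  rw [hlen, pv_lenA ds]
  simp only [List.countP_cons, List.countP_nil, pvPairs, List.filter, h1, h2, h3, h4]
  cases pvHit ds "revenue" <;> cases pvHit ds "margin" <;>
    cases pvHit ds "market" <;> cases pvHit ds "competitive" <;> simp

-- ===== VERDICT (by name: the statement is the Claim_ definition above) =====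
theorem assess_risk_coverage_py_spec : Claim_equal_assess_risk_coverage_py := by
  intro ds _
  unfold Spec_assess_risk_coverage_py
  show assess_risk_coverage_py ds = assess_risk_coverage_py_alt ds
  have h := pv_count_eq ds
  dsimp only [assess_risk_coverage_py, assess_risk_coverage_py_alt]
  rw [← h]
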